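-- pv_equiv track=rewrite | github.com/liuxinuestc/SocialAds_1st | submission.py | sample2accordRate
-- ===== SOURCE A (Python) =====
-- def sample2accordRate(datalabel,nfold):
--     """
--     本代码实现将数据按照类别分层抽样成nfold个不交叉的样本
--     :param datalabel:数据的标签
--     :param nfold:需要得到的数据样本个数
--     :return:数据抽样的分配，返回的是数据索引
--     """
--     inlabel0 = 0
--     inlabel1 = 0
--     indexes = [[] for i in range(nfold)]
--     for i,j in enumerate(datalabel):
--         if j==0:
--             indexes[inlabel0].append(i)
--             inlabel0 = (inlabel0+1)%nfold
--         else: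
--             indexes[inlabel1].append(i)
--             inlabel1 = (inlabel1+1)%nfold
--     return indexes
-- ===== SOURCE B (Python) =====
-- def sample2accordRate(datalabel, nfold):
--     # Partition indices by class, deal each class round-robin (the m-th element of a
--     # class belongs to bucket m % nfold, i.e. bucket k gets the slice cls[k::nfold]),
--     # then rebuild each bucket by merging its two ascending per-class sublists.
--     zeros = [i for i, j in enumerate(datalabel) if j == 0]
--     ones = [i for i, j in enumerate(datalabel) if j != 0]
--     out = []
--     for k in range(nfold):
--         out.append(_merge(zeros[k::nfold], ones[k::nfold]))
--     return out
--
--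
-- def _merge(xs, ys):
--     res = []
--     a = 0
--     b = 0
--     while a < len(xs) and b < len(ys):
--         if xs[a] <= ys[b]:
--             res.append(xs[a])
--             a += 1
--         else:
--             res.append(ys[b])
--             b += 1
--     return res + xs[a:] + ys[b:]
-- ===== Notes on version B (the rewrite author's own statement) =====
-- stated objective: alternative
-- what changed: Replaces A's single stateful pass (two bucket counters with in-place appends into a shared bucket array) by a class-partition: indices are split by label, each class's m-th element is assigned to bucket m % nfold, and each output bucket is the ascending merge of its two per-class sublists.
import Mathlib
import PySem

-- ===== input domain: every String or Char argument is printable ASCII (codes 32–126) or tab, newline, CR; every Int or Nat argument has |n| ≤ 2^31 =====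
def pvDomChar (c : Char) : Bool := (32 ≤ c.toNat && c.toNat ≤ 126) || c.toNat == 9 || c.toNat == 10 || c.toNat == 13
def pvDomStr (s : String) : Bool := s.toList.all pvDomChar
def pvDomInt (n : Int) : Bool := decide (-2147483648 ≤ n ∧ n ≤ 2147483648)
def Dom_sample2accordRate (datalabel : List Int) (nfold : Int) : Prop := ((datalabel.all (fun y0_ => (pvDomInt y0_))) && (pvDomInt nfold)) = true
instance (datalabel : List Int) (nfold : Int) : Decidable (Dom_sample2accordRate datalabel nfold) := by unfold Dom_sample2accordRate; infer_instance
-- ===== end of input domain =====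

-- B replaces A's one-pass dual-counter bucket filling by a per-class round-robin deal plus
-- an ascending merge per bucket (objective: alternative; not faster).

-- ===== PORT A =====
-- indexes[k].append(v) on a list of buckets; k is in range whenever Pre_ holds (index taken
-- as a Nat because the counter is provably nonnegative under Pre_; exact there).
def pvAppendAt : List (List Int) → Nat → Int → List (List Int)
  | [], _, _ => []
  | b :: bs, 0, v => (b ++ [v]) :: bs
  | b :: bs, n + 1, v => b :: pvAppendAt bs n v

def sample2accordRate (datalabel : List Int) (nfold : Int) : List (List Int) :=
  let st := (PySem.List.enumerate datalabel).foldl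
    (fun (st : Int × Int × List (List Int)) (p : Int × Int) =>
      if p.2 == 0 then
        (PySem.Int.mod (st.1 + 1) nfold, st.2.1, pvAppendAt st.2.2 st.1.toNat p.1)
      else
        (st.1, PySem.Int.mod (st.2.1 + 1) nfold, pvAppendAt st.2.2 st.2.1.toNat p.1))
    (0, 0, (List.range nfold.toNat).map (fun _ => ([] : List Int)))
  st.2.2

-- ===== PORT B =====
-- merge of two ascending lists (Source B's _merge two-pointer loop, as structural recursion)
def pvMerge : List Int → List Int → List Int
  | [], ys => ys
  | x :: xs, [] => x :: xs
  | x :: xs, y :: ys =>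
    if x ≤ y then x :: pvMerge xs (y :: ys) else y :: pvMerge (x :: xs) ys

-- hand port of the extended slice xs[::step] (PySem.List.slice has no step parameter):
-- exact for step ≥ 1, the only way Source B uses it (step = nfold > 0 inside Pre_).
def pvEveryNth : List Int → Nat → List Int
  | [], _ => []
  | x :: xs, step => x :: pvEveryNth (xs.drop (step - 1)) step
termination_by xs _ => xs.length
decreasing_by simp only [List.length_drop, List.length_cons]; omega

-- xs[k::nfold] for 0 ≤ k (slice start k ≥ 0 behaves as drop)
def pvDeal (xs : List Int) (nfold k : Int) : List Int :=
  pvEveryNth (xs.drop k.toNat) nfold.toNat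

def sample2accordRate_alt (datalabel : List Int) (nfold : Int) : List (List Int) :=
  let zeros := ((PySem.List.enumerate datalabel).filter (fun p => p.2 == 0)).map (·.1)
  let ones := ((PySem.List.enumerate datalabel).filter (fun p => !(p.2 == 0))).map (·.1)
  (PySem.List.pyRange 0 nfold).map (fun k => pvMerge (pvDeal zeros nfold k) (pvDeal ones nfold k))

-- ===== PRECONDITION & SPEC =====
-- Pre_ excludes exactly the inputs on which A raises IndexError: nfold ≤ 0 with a nonempty datalabel.
def Pre_sample2accordRate (datalabel : List Int) (nfold : Int) : Prop :=
  0 < nfold ∨ datalabel = []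
instance (datalabel : List Int) (nfold : Int) : Decidable (Pre_sample2accordRate datalabel nfold) := by
  unfold Pre_sample2accordRate; infer_instance
def pvWitness_sample2accordRate : List Int × Int := ([0, 1, 0, 2, 0], 2)

def Spec_sample2accordRate (datalabel : List Int) (nfold : Int) (out : List (List Int)) : Prop :=
  out = sample2accordRate_alt datalabel nfold
instance (datalabel : List Int) (nfold : Int) (out : List (List Int)) : Decidable (Spec_sample2accordRate datalabel nfold out) := by
  unfold Spec_sample2accordRate; infer_instance

-- ===== CLAIM (what is proved, stated in full; the proofs are below) =====
def Claim_equal_sample2accordRate : Prop := ∀ (datalabel : List Int) (nfold : Int), Dom_sample2accordRate datalabel nfold → Pre_sample2accordRate datalabel nfold → Spec_sample2accordRate datalabel nfold (sample2accordRate datalabel nfold)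

-- ===== LEMMAS AND PROOFS =====

-- indices of zero-labelled / other elements (the two `let`s of sample2accordRate_alt)
def zI (l : List Int) : List Int := ((PySem.List.enumerate l).filter (fun p => p.2 == 0)).map (·.1)
def oI (l : List Int) : List Int := ((PySem.List.enumerate l).filter (fun p => !(p.2 == 0))).map (·.1)

theorem zI_append (l : List Int) (x : Int) :
    zI (l ++ [x]) = zI l ++ (if x == 0 then [(l.length : Int)] else []) := by
  unfold zI
  rw [PySem.List.enumerate_append]
  cases hx : (x == 0) <;>
    simp [PySem.List.enumerate_cons, PySem.List.enumerate_nil, List.filter_append, hx]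

theorem oI_append (l : List Int) (x : Int) :
    oI (l ++ [x]) = oI l ++ (if x == 0 then [] else [(l.length : Int)]) := by
  unfold oI
  rw [PySem.List.enumerate_append]
  cases hx : (x == 0) <;>
    simp [PySem.List.enumerate_cons, PySem.List.enumerate_nil, List.filter_append, hx]

theorem zI_lt (l : List Int) {a : Int} (h : a ∈ zI l) : a < (l.length : Int) := by
  unfold zI at h
  simp only [List.mem_map, List.mem_filter] at h
  obtain ⟨p, ⟨hp, -⟩, rfl⟩ := h
  rw [PySem.List.mem_enumerate_iff] at hp
  obtain ⟨k, hk, rfl⟩ := hp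
  simp; omega

theorem oI_lt (l : List Int) {a : Int} (h : a ∈ oI l) : a < (l.length : Int) := by
  unfold oI at h
  simp only [List.mem_map, List.mem_filter] at h
  obtain ⟨p, ⟨hp, -⟩, rfl⟩ := h
  rw [PySem.List.mem_enumerate_iff] at hp
  obtain ⟨k, hk, rfl⟩ := hp
  simp; omega

theorem EN_sublist (n : Nat) : ∀ (L : Nat) (ys : List Int), ys.length ≤ L →
    List.Sublist (pvEveryNth ys n) ys := by
  intro L
  induction L with
  | zero =>
    intro ys h
    cases ys with
    | nil => simp [pvEveryNth]
    | cons y ys => simp at h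
  | succ L ih =>
    intro ys h
    cases ys with
    | nil => simp [pvEveryNth]
    | cons y ys =>
      rw [show pvEveryNth (y :: ys) n = y :: pvEveryNth (ys.drop (n - 1)) n from by
        simp [pvEveryNth]]
      exact List.Sublist.cons₂ y
        ((ih (ys.drop (n - 1)) (by simp at h ⊢; omega)).trans (List.drop_sublist _ _))

theorem mem_deal {xs : List Int} {n k a : Int} (h : a ∈ pvDeal xs n k) : a ∈ xs := by
  unfold pvDeal at h
  exact (List.drop_sublist k.toNat xs).mem
    ((EN_sublist n.toNat (List.drop k.toNat xs).length _ le_rfl).mem h)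

theorem deal_nil (n k : Int) : pvDeal [] n k = [] := by
  simp [pvDeal, pvEveryNth]

theorem EN_append (n : Nat) (hn : 0 < n) :
    ∀ (L : Nat) (ys : List Int), ys.length ≤ L → ∀ (v : Int),
      pvEveryNth (ys ++ [v]) n
        = pvEveryNth ys n ++ (if n ∣ ys.length then [v] else []) := by
  intro L
  induction L with
  | zero =>
    intro ys h v
    cases ys with
    | nil => simp [pvEveryNth]
    | cons y ys => simp at h
  | succ L ih =>
    intro ys h v
    cases ys with
    | nil => simp [pvEveryNth]
    | cons y ys =>
      rw [List.cons_append,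
        show pvEveryNth (y :: (ys ++ [v])) n = y :: pvEveryNth ((ys ++ [v]).drop (n - 1)) n
          from by simp [pvEveryNth],
        show pvEveryNth (y :: ys) n = y :: pvEveryNth (ys.drop (n - 1)) n
          from by simp [pvEveryNth]]
      by_cases hd : n - 1 ≤ ys.length
      · rw [List.drop_append_of_le_length hd,
          ih (ys.drop (n - 1)) (by simp at h ⊢; omega) v]
        have hc : (n ∣ ys.length - (n - 1)) = (n ∣ (ys.length + 1)) := by
          have h1 : ys.length + 1 = (ys.length - (n - 1)) + n := by omega
          rw [h1, Nat.dvd_add_self_right]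
        simp only [List.length_drop, List.length_cons, hc]
        simp
      · have h1 : (ys ++ [v]).drop (n - 1) = [] :=
          List.drop_eq_nil_of_le (by simp; omega)
        have h2 : ys.drop (n - 1) = [] := List.drop_eq_nil_of_le (by omega)
        have h3 : ¬ (n ∣ (ys.length + 1)) := by
          intro hdvd
          have := Nat.eq_zero_of_dvd_of_lt hdvd (by omega)
          omega
        simp only [List.length_cons, h1, h2, if_neg h3]
        simp [pvEveryNth]

theorem deal_append (xs : List Int) (v n k : Int) (hn : 0 < n) (hk0 : 0 ≤ k) (hk : k < n) :
    pvDeal (xs ++ [v]) n k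
      = pvDeal xs n k ++ (if PySem.Int.mod (xs.length : Int) n == k then [v] else []) := by
  have hnn : ((n.toNat : Nat) : Int) = n := by omega
  have hmodcast : PySem.Int.mod (xs.length : Int) n = ((xs.length % n.toNat : Nat) : Int) := by
    conv_lhs => rw [← hnn]
    rw [PySem.Int.mod_natCast]
  unfold pvDeal
  by_cases hkl : k.toNat ≤ xs.length
  · rw [List.drop_append_of_le_length hkl,
      EN_append n.toNat (by omega) (xs.drop k.toNat).length _ le_rfl v]
    congr 1
    have hlen : (xs.drop k.toNat).length = xs.length - k.toNat := by simp
    rw [hlen, hmodcast]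
    have hiff : (n.toNat ∣ xs.length - k.toNat) ↔ (xs.length % n.toNat = k.toNat) := by
      constructor
      · rintro ⟨t, ht⟩
        have h1 : xs.length = n.toNat * t + k.toNat := by omega
        rw [h1, Nat.mul_add_mod]
        exact Nat.mod_eq_of_lt (by omega)
      · intro h
        refine ⟨xs.length / n.toNat, ?_⟩
        have := Nat.div_add_mod xs.length n.toNat
        omega
    by_cases hc : n.toNat ∣ xs.length - k.toNat
    · rw [if_pos hc, if_pos (by rw [beq_iff_eq]; have := hiff.mp hc; omega)]
    · rw [if_neg hc, if_neg (by rw [beq_iff_eq]; intro h2; exact hc (hiff.mpr (by omega)))]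
  · have h1 : (xs ++ [v]).drop k.toNat = [] := List.drop_eq_nil_of_le (by simp; omega)
    have h2 : xs.drop k.toNat = [] := List.drop_eq_nil_of_le (by omega)
    have h3 : xs.length % n.toNat ≤ xs.length := Nat.mod_le _ _
    rw [h1, h2, hmodcast, if_neg (by rw [beq_iff_eq]; omega)]
    simp [pvEveryNth]

theorem pvMerge_nil_right (xs : List Int) : pvMerge xs [] = xs := by
  cases xs <;> simp [pvMerge]

theorem merge_single {ys : List Int} {v : Int} (hy : ∀ b ∈ ys, b < v) :
    pvMerge [v] ys = ys ++ [v] := by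
  induction ys with
  | nil => simp [pvMerge]
  | cons y ys ih =>
    have hyv : ¬ v ≤ y := by have := hy y (by simp); omega
    rw [show pvMerge [v] (y :: ys) = y :: pvMerge [v] ys by simp [pvMerge, hyv]]
    rw [ih (fun b hb => hy b (by simp [hb]))]
    simp

theorem merge_append_right (xs : List Int) :
    ∀ (ys : List Int) (v : Int), (∀ a ∈ xs, a < v) →
      pvMerge xs (ys ++ [v]) = pvMerge xs ys ++ [v] := by
  induction xs with
  | nil => intro ys v _; simp [pvMerge]
  | cons x xs ih =>
    intro ys v hx
    induction ys with
    | nil =>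
      have hxv : x ≤ v := le_of_lt (hx x (by simp))
      have h2 := ih [] v (fun a ha => hx a (by simp [ha]))
      simp only [List.nil_append, pvMerge_nil_right] at h2 ⊢
      rw [show pvMerge (x :: xs) [v] = x :: pvMerge xs [v] by simp [pvMerge, hxv], h2]
      simp
    | cons y ys ihy =>
      by_cases hxy : x ≤ y
      · rw [List.cons_append,
          show pvMerge (x :: xs) (y :: (ys ++ [v])) = x :: pvMerge xs (y :: (ys ++ [v]))
            by simp [pvMerge, hxy],
          show pvMerge (x :: xs) (y :: ys) = x :: pvMerge xs (y :: ys)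
            by simp [pvMerge, hxy]]
        rw [show (y :: (ys ++ [v])) = (y :: ys) ++ [v] by simp,
          ih (y :: ys) v (fun a ha => hx a (by simp [ha]))]
        simp
      · rw [List.cons_append,
          show pvMerge (x :: xs) (y :: (ys ++ [v])) = y :: pvMerge (x :: xs) (ys ++ [v])
            by simp [pvMerge, hxy],
          show pvMerge (x :: xs) (y :: ys) = y :: pvMerge (x :: xs) ys
            by simp [pvMerge, hxy]]
        rw [ihy]
        simp

theorem merge_append_left (xs : List Int) :
    ∀ (ys : List Int) (v : Int), (∀ a ∈ xs, a < v) → (∀ b ∈ ys, b < v) →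
      pvMerge (xs ++ [v]) ys = pvMerge xs ys ++ [v] := by
  induction xs with
  | nil => intro ys v _ hy; simpa [pvMerge] using merge_single hy
  | cons x xs ih =>
    intro ys v hx hy
    induction ys with
    | nil => simp [pvMerge_nil_right]
    | cons y ys ihy =>
      by_cases hxy : x ≤ y
      · rw [List.cons_append,
          show pvMerge (x :: (xs ++ [v])) (y :: ys) = x :: pvMerge (xs ++ [v]) (y :: ys)
            by simp [pvMerge, hxy],
          show pvMerge (x :: xs) (y :: ys) = x :: pvMerge xs (y :: ys)
            by simp [pvMerge, hxy],
          ih (y :: ys) v (fun a ha => hx a (by simp [ha])) hy]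
        simp
      · rw [List.cons_append,
          show pvMerge (x :: (xs ++ [v])) (y :: ys) = y :: pvMerge (x :: (xs ++ [v])) ys
            by simp [pvMerge, hxy],
          show pvMerge (x :: xs) (y :: ys) = y :: pvMerge (x :: xs) ys
            by simp [pvMerge, hxy],
          ← List.cons_append, ihy (fun b hb => hy b (by simp [hb]))]
        simp

theorem appendAt_map_range' (f : Nat → List Int) :
    ∀ (n s m : Nat) (v : Int), m < n →
      pvAppendAt ((List.range' s n).map f) m v
        = (List.range' s n).map (fun j => if j = s + m then f j ++ [v] else f j) := by
  intro n
  induction n with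
  | zero => intro s m v h; omega
  | succ n ihn =>
    intro s m v h
    rw [List.range'_succ]
    cases m with
    | zero =>
      simp only [List.map_cons, pvAppendAt, Nat.add_zero]
      congr 1
      apply List.map_congr_left
      intro j hj
      have : s + 1 ≤ j := (List.mem_range'_1.mp hj).1
      rw [if_neg (by omega)]
    | succ m =>
      simp only [List.map_cons, pvAppendAt]
      rw [if_neg (by omega), ihn (s + 1) m v (by omega)]
      congr 1
      apply List.map_congr_left
      intro j hj
      have h1 : s + 1 + m = s + (m + 1) := by omega
      rw [h1]

theorem alt_eq (l : List Int) (n : Int) :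
    sample2accordRate_alt l n
      = (PySem.List.pyRange 0 n).map
          (fun k => pvMerge (pvDeal (zI l) n k) (pvDeal (oI l) n k)) := rfl

-- the main loop invariant: A's fold state after l is (count0 % n, count1 % n, B's buckets)
theorem main_inv (nfold : Int) (hn : 0 < nfold) (l : List Int) :
    ((PySem.List.enumerate l).foldl
      (fun (st : Int × Int × List (List Int)) (p : Int × Int) =>
        if p.2 == 0 then
          (PySem.Int.mod (st.1 + 1) nfold, st.2.1, pvAppendAt st.2.2 st.1.toNat p.1)
        else
          (st.1, PySem.Int.mod (st.2.1 + 1) nfold, pvAppendAt st.2.2 st.2.1.toNat p.1))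
      (0, 0, (List.range nfold.toNat).map (fun _ => ([] : List Int))))
    = (PySem.Int.mod ((zI l).length : Int) nfold, PySem.Int.mod ((oI l).length : Int) nfold,
       sample2accordRate_alt l nfold) := by
  induction l using List.reverseRecOn with
  | nil =>
    have h0 : PySem.Int.mod 0 nfold = 0 := by
      rw [PySem.Int.mod_eq_emod_of_pos hn]; simp
    simp only [PySem.List.enumerate_nil, List.foldl_nil, zI, oI,
      PySem.List.enumerate_nil, List.filter_nil, List.map_nil, List.length_nil,
      Int.natCast_zero, h0, sample2accordRate_alt, deal_nil]
    rw [PySem.List.pyRange_zero, List.map_map]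
    simp [pvMerge, Function.comp_def, List.map_const']
  | append_singleton l x ih =>
    rw [PySem.List.enumerate_append, List.foldl_append, ih]
    simp only [PySem.List.enumerate_cons, PySem.List.enumerate_nil, List.foldl_cons,
      List.foldl_nil, zero_add]
    have hm0 := PySem.Int.mod_nonneg ((zI l).length : Int) hn
    have hmlt := PySem.Int.mod_lt ((zI l).length : Int) hn
    have hm0' := PySem.Int.mod_nonneg ((oI l).length : Int) hn
    have hmlt' := PySem.Int.mod_lt ((oI l).length : Int) hn
    cases hx : (x == 0) with
    | true =>
      rw [if_pos (by simp)]
      have hz : zI (l ++ [x]) = zI l ++ [(l.length : Int)] := by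
        rw [zI_append]; simp [hx]
      have ho : oI (l ++ [x]) = oI l := by
        rw [oI_append]; simp [hx]
      refine Prod.ext ?_ (Prod.ext (by rw [ho]) ?_)
      · rw [hz]
        simp only [List.length_append, List.length_cons, List.length_nil]
        rw [PySem.Int.mod_eq_emod_of_pos hn, PySem.Int.mod_eq_emod_of_pos hn,
          PySem.Int.mod_eq_emod_of_pos hn]
        push_cast
        rw [Int.add_emod, Int.emod_emod_of_dvd _ dvd_rfl, ← Int.add_emod]
      · rw [alt_eq, alt_eq, hz, ho, PySem.List.pyRange_zero, List.map_map, List.map_map,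
          List.range_eq_range',
          appendAt_map_range' _ nfold.toNat 0 (PySem.Int.mod ((zI l).length : Int) nfold).toNat
            ((l.length : Nat) : Int) (by omega)]
        apply List.map_congr_left
        intro j hj
        have hjlt : j < nfold.toNat := by
          have := (List.mem_range'_1.mp hj).2; omega
        simp only [Function.comp_apply]
        rw [deal_append (zI l) _ nfold (j : Int) hn (by omega) (by omega)]
        by_cases hjm : j = (PySem.Int.mod ((zI l).length : Int) nfold).toNat
        · rw [if_pos (by omega),
            if_pos (by rw [beq_iff_eq]; omega)]
          exact (merge_append_left _ _ _
            (fun a ha => zI_lt l (mem_deal ha))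
            (fun b hb => oI_lt l (mem_deal hb))).symm
        · rw [if_neg (by omega),
            if_neg (by rw [beq_iff_eq]; omega)]
          simp
    | false =>
      rw [if_neg (by simp)]
      have hz : zI (l ++ [x]) = zI l := by
        rw [zI_append]; simp [hx]
      have ho : oI (l ++ [x]) = oI l ++ [(l.length : Int)] := by
        rw [oI_append]; simp [hx]
      refine Prod.ext (by rw [hz]) (Prod.ext ?_ ?_)
      · rw [ho]
        simp only [List.length_append, List.length_cons, List.length_nil]
        rw [PySem.Int.mod_eq_emod_of_pos hn, PySem.Int.mod_eq_emod_of_pos hn,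
          PySem.Int.mod_eq_emod_of_pos hn]
        push_cast
        rw [Int.add_emod, Int.emod_emod_of_dvd _ dvd_rfl, ← Int.add_emod]
      · rw [alt_eq, alt_eq, hz, ho, PySem.List.pyRange_zero, List.map_map, List.map_map,
          List.range_eq_range',
          appendAt_map_range' _ nfold.toNat 0 (PySem.Int.mod ((oI l).length : Int) nfold).toNat
            ((l.length : Nat) : Int) (by omega)]
        apply List.map_congr_left
        intro j hj
        have hjlt : j < nfold.toNat := by
          have := (List.mem_range'_1.mp hj).2; omega
        simp only [Function.comp_apply]
        rw [deal_append (oI l) _ nfold (j : Int) hn (by omega) (by omega)]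
        by_cases hjm : j = (PySem.Int.mod ((oI l).length : Int) nfold).toNat
        · rw [if_pos (by omega),
            if_pos (by rw [beq_iff_eq]; omega)]
          exact (merge_append_right _ _ _
            (fun a ha => zI_lt l (mem_deal ha))).symm
        · rw [if_neg (by omega),
            if_neg (by rw [beq_iff_eq]; omega)]
          simp

-- ===== VERDICT (by name: the statement is the Claim_ definition above) =====
theorem sample2accordRate_spec : Claim_equal_sample2accordRate := by
  intro dl nf _ hpre
  unfold Spec_sample2accordRate
  rcases hpre with hn | rfl
  · unfold sample2accordRate
    rw [main_inv nf hn dl]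
  · rw [alt_eq]
    unfold sample2accordRate
    simp [PySem.List.enumerate_nil, zI, oI, deal_nil, PySem.List.pyRange_zero,
      pvMerge, Function.comp_def]
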